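-- pv_equiv track=rewrite | github.com/akshattyagi730-tech/Neuro-Defender | backend/utils/helpers.py | generate_image_summary_v3
-- ===== SOURCE A (Python) =====
-- def generate_image_summary_v3(scores: dict, threat: str) -> str:
--     if threat == "SAFE":
--         return "Image passes all forensic checks. No manipulation detected."
--     if threat == "LOW":
--         return "Minor anomalies detected. Likely processed (resized/compressed) but not maliciously altered."
--     labels = {
--         "pixel": "pixel histogram/channel anomaly",
--         "lsb": "bit-level LSB payload or steganography",
--         "frequency": "frequency-domain artifact (DCT/compression forensics)",
--         "edge": "edge/texture inconsistency (clone-stamp or splice)",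
--         "noise": "anomalous noise pattern (injected or inconsistent)",
--         "squeeze": "JPEG quality-squeeze residual",
--         "reconstruction": "reconstruction divergence (adversarial perturbation)",
--         "reconstruct": "high Laplacian energy (high-frequency anomaly)",
--         "metadata": "metadata/EXIF anomaly",
--     }
--     top = sorted(
--         [(k, v) for k, v in scores.items() if k != "combined"],
--         key=lambda x: x[1], reverse=True
--     )[:2]
--     findings = " + ".join(labels.get(k, k) for k, _ in top)
--     return (
--         f"High-confidence forensic threat: {findings}."
--         if threat == "HIGH"
--         else f"Suspicious forensic signals: {findings}."
--     )
-- ===== SOURCE B (Python) =====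
-- def generate_image_summary_v3(scores: dict, threat: str) -> str:
--     if threat == "SAFE":
--         return "Image passes all forensic checks. No manipulation detected."
--     if threat == "LOW":
--         return "Minor anomalies detected. Likely processed (resized/compressed) but not maliciously altered."
--     labels = {
--         "pixel": "pixel histogram/channel anomaly",
--         "lsb": "bit-level LSB payload or steganography",
--         "frequency": "frequency-domain artifact (DCT/compression forensics)",
--         "edge": "edge/texture inconsistency (clone-stamp or splice)",
--         "noise": "anomalous noise pattern (injected or inconsistent)",
--         "squeeze": "JPEG quality-squeeze residual",
--         "reconstruction": "reconstruction divergence (adversarial perturbation)",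
--         "reconstruct": "high Laplacian energy (high-frequency anomaly)",
--         "metadata": "metadata/EXIF anomaly",
--     }
--     # Single pass: keep the best and second-best entries; replace only on a
--     # STRICTLY greater value, so earlier-inserted keys win ties (the stable
--     # reverse-sort order).
--     best = second = None
--     for k, v in scores.items():
--         if k == "combined":
--             continue
--         if best is None:
--             best = (k, v)
--         elif v > best[1]:
--             best, second = (k, v), best
--         elif second is None or v > second[1]:
--             second = (k, v)
--     top = [p for p in (best, second) if p is not None]
--     findings = " + ".join(labels.get(k, k) for k, _ in top)
--     return (
--         f"High-confidence forensic threat: {findings}."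
--         if threat == "HIGH"
--         else f"Suspicious forensic signals: {findings}."
--     )
-- ===== Notes on version B (the rewrite author's own statement) =====
-- stated objective: alternative
-- what changed: Replaces A's sort-then-slice (build the filtered list, stable reverse-sort it by value, take the first two) with a single fold over the items that maintains the best and second-best (key, value) entries, replacing only on a strictly greater value so earlier keys win ties exactly as the stable reverse sort does.
import Mathlib
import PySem

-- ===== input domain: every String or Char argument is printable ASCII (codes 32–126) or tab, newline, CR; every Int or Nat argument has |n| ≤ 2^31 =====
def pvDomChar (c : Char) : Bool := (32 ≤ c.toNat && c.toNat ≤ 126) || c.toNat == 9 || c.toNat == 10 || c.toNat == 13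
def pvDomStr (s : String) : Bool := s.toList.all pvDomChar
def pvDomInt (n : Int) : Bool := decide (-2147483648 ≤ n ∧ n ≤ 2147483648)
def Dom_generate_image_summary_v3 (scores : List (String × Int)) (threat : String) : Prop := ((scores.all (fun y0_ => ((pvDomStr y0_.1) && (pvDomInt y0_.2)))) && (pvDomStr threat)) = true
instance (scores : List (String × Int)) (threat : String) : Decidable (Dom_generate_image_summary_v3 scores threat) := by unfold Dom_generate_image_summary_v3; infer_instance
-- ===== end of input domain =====

-- B replaces A's sort-then-slice top-2 selection by a single pass that tracks the
-- best and second-best entries (replace only on strictly greater, so ties keep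
-- the stable reverse-sort order); objective: alternative (O(n) selection instead
-- of O(n log n) sorting).

-- ===== PORT A =====
-- the literal `labels` dict and its .get(k, k) lookup (shared verbatim by both Pythons)
def pvLabels : PySem.Dict String String := PySem.Dict.ofList
  [("pixel", "pixel histogram/channel anomaly"),
   ("lsb", "bit-level LSB payload or steganography"),
   ("frequency", "frequency-domain artifact (DCT/compression forensics)"),
   ("edge", "edge/texture inconsistency (clone-stamp or splice)"),
   ("noise", "anomalous noise pattern (injected or inconsistent)"),
   ("squeeze", "JPEG quality-squeeze residual"),
   ("reconstruction", "reconstruction divergence (adversarial perturbation)"),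
   ("reconstruct", "high Laplacian energy (high-frequency anomaly)"),
   ("metadata", "metadata/EXIF anomaly")]

def generate_image_summary_v3 (scores : List (String × Int)) (threat : String) : String :=
  if threat = "SAFE" then
    "Image passes all forensic checks. No manipulation detected."
  else if threat = "LOW" then
    "Minor anomalies detected. Likely processed (resized/compressed) but not maliciously altered."
  else
    -- sorted([(k, v) for k, v in scores.items() if k != "combined"], key=lambda x: x[1], reverse=True)[:2]
    let top := (PySem.List.sorted (scores.filter (fun p => !(p.1 == "combined"))) (fun x => x.2) true).take 2
    let findings := PySem.Str.join " + " (top.map (fun p => PySem.Dict.getD pvLabels p.1 p.1))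
    if threat = "HIGH" then
      "High-confidence forensic threat: " ++ findings ++ "."
    else
      "Suspicious forensic signals: " ++ findings ++ "."

-- ===== PORT B =====
-- one loop step: keep (best, second); replace only on a strictly greater value
def pvTop2Step (st : Option (String × Int) × Option (String × Int)) (p : String × Int) :
    Option (String × Int) × Option (String × Int) :=
  match st with
  | (none, b2) => (some p, b2)
  | (some b1, b2) =>
    if p.2 > b1.2 then (some p, some b1)
    else
      match b2 with
      | none => (some b1, some p)
      | some b2' => if p.2 > b2'.2 then (some b1, some p) else (some b1, some b2')

def generate_image_summary_v3_alt (scores : List (String × Int)) (threat : String) : String :=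
  if threat = "SAFE" then
    "Image passes all forensic checks. No manipulation detected."
  else if threat = "LOW" then
    "Minor anomalies detected. Likely processed (resized/compressed) but not maliciously altered."
  else
    let st := scores.foldl (fun st p => if p.1 == "combined" then st else pvTop2Step st p) (none, none)
    let top := ([st.1, st.2].filterMap id)
    let findings := PySem.Str.join " + " (top.map (fun p => PySem.Dict.getD pvLabels p.1 p.1))
    if threat = "HIGH" then
      "High-confidence forensic threat: " ++ findings ++ "."
    else
      "Suspicious forensic signals: " ++ findings ++ "."

-- ===== PRECONDITION & SPEC =====
def Spec_generate_image_summary_v3 (scores : List (String × Int)) (threat : String) (out : String) : Prop := out = generate_image_summary_v3_alt scores threat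
instance (scores : List (String × Int)) (threat : String) (out : String) : Decidable (Spec_generate_image_summary_v3 scores threat out) := by unfold Spec_generate_image_summary_v3; infer_instance

-- ===== CLAIM (what is proved, stated in full; the proofs are below) =====
def Claim_equal_generate_image_summary_v3 : Prop := ∀ (scores : List (String × Int)) (threat : String), Dom_generate_image_summary_v3 scores threat → Spec_generate_image_summary_v3 scores threat (generate_image_summary_v3 scores threat)

-- ===== LEMMAS AND PROOFS =====

-- the (best, second) state as a function of the first two elements of a list
def pvEncode2 : List (String × Int) → Option (String × Int) × Option (String × Int)
  | [] => (none, none)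
  | [a] => (some a, none)
  | a :: b :: _ => (some a, some b)

-- one insertion step of the stable reverse insertion sort, seen through pvEncode2
theorem pvTop2Step_encode2 (s : List (String × Int)) (p : String × Int) :
    pvTop2Step (pvEncode2 s) p =
      pvEncode2 (PySem.List.insertBy (fun a b => decide (b.2 < a.2)) p s) := by
  match s with
  | [] => rfl
  | [a] =>
    simp only [pvEncode2, pvTop2Step, PySem.List.insertBy]
    split_ifs <;> first | (simp_all; done) | omega | (simp_all; omega)
  | a :: b :: t =>
    simp only [pvEncode2, pvTop2Step, PySem.List.insertBy]
    split_ifs <;> first | (simp_all; done) | omega | (simp_all; omega)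

-- the fold of pvTop2Step tracks pvEncode2 of the insertion-sort fold
theorem pvTop2_fold (l : List (String × Int)) :
    ∀ s : List (String × Int),
      l.foldl pvTop2Step (pvEncode2 s) =
        pvEncode2 (l.foldl (fun acc x => PySem.List.insertBy (fun a b => decide (b.2 < a.2)) x acc) s) := by
  induction l with
  | nil => intro s; rfl
  | cons h t ih =>
    intro s
    simp only [List.foldl_cons, pvTop2Step_encode2]
    exact ih _

theorem pvEncode2_filterMap (s : List (String × Int)) :
    [(pvEncode2 s).1, (pvEncode2 s).2].filterMap id = s.take 2 := by
  match s with
  | [] => rfl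
  | [a] => rfl
  | a :: b :: t => rfl

-- B's whole loop equals A's sorted-take-2
theorem pvTop2_eq_sorted_take (scores : List (String × Int)) :
    (let st := scores.foldl (fun st p => if p.1 == "combined" then st else pvTop2Step st p) (none, none)
     [st.1, st.2].filterMap id) =
      (PySem.List.sorted (scores.filter (fun p => !(p.1 == "combined"))) (fun x => x.2) true).take 2 := by
  have hguard : (fun (st : Option (String × Int) × Option (String × Int)) p =>
      if p.1 == "combined" then st else pvTop2Step st p) =
      (fun st p => if !(p.1 == "combined") then pvTop2Step st p else st) := by
    funext st p
    by_cases h : p.1 == "combined" <;> simp [h]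
  rw [hguard, ← List.foldl_filter]
  have h0 : ((none, none) : Option (String × Int) × Option (String × Int)) = pvEncode2 [] := rfl
  rw [h0, pvTop2_fold, pvEncode2_filterMap,
    ← PySem.List.sorted_rev_eq_foldl_insertBy (scores.filter (fun p => !(p.1 == "combined"))) (fun x => x.2)]

-- ===== VERDICT (by name: the statement is the Claim_ definition above) =====
theorem generate_image_summary_v3_spec : Claim_equal_generate_image_summary_v3 := by
  intro scores threat _
  show generate_image_summary_v3 scores threat = generate_image_summary_v3_alt scores threat
  unfold generate_image_summary_v3 generate_image_summary_v3_alt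
  rw [← pvTop2_eq_sorted_take scores]
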